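-- pv_equiv track=rewrite | github.com/informatics-lab/image-service-public | imageservice/packer.py | find_i_j
-- ===== SOURCE A (Python) =====
-- from math import trunc, log, ceil
--
-- def find_i_j(x, y, z, nchannels=3, maxdimsize=4096):
-- 	"""
-- 	finds the combination of i and j which minimizes the number of wasted
-- 	pixels for input images of dimensions x and y with number of images z
--
-- 	"""
-- 	z = ceil(z/nchannels) # take account having different layers of tiles
--
-- 	if x*y*z > maxdimsize**2:
-- 		raise ValueError("Tiled array range not big enough")
--
-- 	max_n = int(ceil(log(maxdimsize, 2))) # n value required if max images in i direction
-- 	max_m = int(ceil(log(maxdimsize, 2))) # m value required if max images in j direction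
--
-- 	solutions = [] # hold n, m and the number of wasted pixels for a solution
-- 	sol_num = 0
--
-- 	for n in range(1, max_n + 1):
-- 		for m in range(1, max_m + 1):
-- 			if(trunc(2**n / x) * trunc(2**m / y) >= z):
-- 				# determines if a tile of with dimesions of n and m can contain
-- 				# all the images
--
-- 				sol_info = []
-- 				sol_info.append(n)
-- 				sol_info.append(m)
-- 				sol_info.append(waste_det(x, y, z, n, m))
--
-- 				solutions.append(sol_info)
--
-- 				sol_num += 1
--
-- 	sol_total = sol_num # records total number of solutions
--
-- 	opt = find_waste_min(sol_total, solutions) # gets properties of optimal solution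
--
-- 	i = 2**opt[1]
-- 	j = 2**opt[2]
--
-- 	tile_dim = [i, j]
--
-- 	return tile_dim
--
-- def find_waste_min(sol_total, solutions):
-- 	"""
-- 	finds solution with the lowest number of wasted pixels
-- 	"""
--
-- 	waste_min = solutions[0][2] + 1
--
-- 	for sol_num in range(0, sol_total): # finds solution with lowest waste
-- 		if(waste_min > solutions[sol_num][2]):
-- 			opt = []
--
-- 			waste_min = solutions[sol_num][2]
-- 			n = solutions[sol_num][0]
-- 			m = solutions[sol_num][1]
--
-- 			opt.append(waste_min)
-- 			opt.append(n)
-- 			opt.append(m)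
--
-- 	return opt
--
-- def waste_det(x, y, z, n, m):
-- 	"""
-- 	determines the number of dead pixels for given image properties (x, y, z)
-- 	and tile properties (n, m)
-- 	"""
-- 	dead_pixels = 2**(n+m) - x * y * z
-- 	return dead_pixels
-- ===== SOURCE B (Python) =====
-- from math import trunc, log, ceil
--
-- def find_i_j(x, y, z, nchannels=3, maxdimsize=4096):
--     """
--     Single-pass variant: instead of collecting every feasible (n, m) into a
--     solutions list and scanning it again for the minimum waste, track the best
--     (waste, n, m) seen so far while iterating; first minimum in n-outer,
--     m-inner order wins, as in the original.
--     """
--     z = ceil(z / nchannels)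
--     if x * y * z > maxdimsize ** 2:
--         raise ValueError("Tiled array range not big enough")
--     max_n = int(ceil(log(maxdimsize, 2)))
--     best = None  # (waste, n, m)
--     for n in range(1, max_n + 1):
--         cap_n = trunc(2 ** n / x)
--         for m in range(1, max_n + 1):
--             if cap_n * trunc(2 ** m / y) >= z:
--                 waste = 2 ** (n + m) - x * y * z
--                 if best is None or waste < best[0]:
--                     best = (waste, n, m)
--     if best is None:
--         raise ValueError("no feasible tiling")
--     return [2 ** best[1], 2 ** best[2]]
-- ===== Notes on version B (the rewrite author's own statement) =====
-- stated objective: simpler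
-- what changed: Replaces the build-a-solutions-list-with-a-counter plus separate second find_waste_min scan (solutions[0][2]+1 sentinel, indexed loop) by a single nested loop that keeps a running best (waste,n,m), with the invariant x-capacity hoisted out of the inner loop; no intermediate list or counter.
import Mathlib
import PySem

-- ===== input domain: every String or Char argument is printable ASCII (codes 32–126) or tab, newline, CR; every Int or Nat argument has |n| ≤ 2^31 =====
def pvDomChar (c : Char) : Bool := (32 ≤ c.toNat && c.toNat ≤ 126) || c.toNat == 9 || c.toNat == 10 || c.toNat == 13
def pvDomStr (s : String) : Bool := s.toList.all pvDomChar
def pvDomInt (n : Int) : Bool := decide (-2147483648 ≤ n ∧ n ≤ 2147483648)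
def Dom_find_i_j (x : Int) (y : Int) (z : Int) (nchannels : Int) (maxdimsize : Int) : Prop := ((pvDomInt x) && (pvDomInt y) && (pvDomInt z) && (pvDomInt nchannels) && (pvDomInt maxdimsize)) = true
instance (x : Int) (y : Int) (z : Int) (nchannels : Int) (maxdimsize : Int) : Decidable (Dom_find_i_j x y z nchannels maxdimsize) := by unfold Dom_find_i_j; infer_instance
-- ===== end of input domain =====

-- B replaces A's two passes (collect all feasible (n,m) in a list, then scan it for the
-- minimum waste) by one nested loop tracking the running best; same return value on Pre_.

-- shared helpers (used by both ports and by Pre_): exact models of A's float steps on Dom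
-- ceil(z / nchannels): Python float division then math.ceil; exact for |z| ≤ 2^31 (the
-- rounding error of the float quotient is below the distance to the next integer)
def pvCeilDiv (a b : Int) : Int := -(PySem.Int.floordiv (-a) b)

-- int(ceil(log(m, 2))): equals the exact ceiling of log2 m for 1 ≤ m ≤ 2^31, EXCEPT at
-- m = 2^29 and m = 2^31 where the float quotient log(m)/log(2) lands one ulp above the
-- integer and ceil rounds up (checked exhaustively below 2^20 and around every 2^k ≤ 2^31)
def pvCeilLog2 (m : Int) : Int :=
  let e : Int := if m ≤ 1 then 0 else (Nat.log2 (m - 1).toNat : Int) + 1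
  if m = 2 ^ 29 ∨ m = 2 ^ 31 then e + 1 else e

-- ===== PORT A =====
-- trunc(2**n / x): float division then trunc; exact = Int.tdiv for 2^n < 2^53, |x| ≤ 2^31
-- sol_info lists [n, m, waste] are ported as triples (n, m, waste); opt as (waste, n, m)
def pvWasteDet (x : Int) (y : Int) (z : Int) (n : Int) (m : Int) : Int :=
  2 ^ (n + m).toNat - x * y * z

-- one step of find_waste_min's loop body, acting on the value solutions[sol_num]
def pvScanF (st : Int × Option (Int × Int × Int)) (sol : Int × Int × Int) :
    Int × Option (Int × Int × Int) :=
  if st.1 > sol.2.2 then (sol.2.2, some (sol.2.2, sol.1, sol.2.1)) else st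

def pvFindWasteMin (sol_total : Int) (solutions : List (Int × Int × Int)) :
    Option (Int × Int × Int) :=
  match PySem.List.pyGet? solutions 0 with
  | none => none  -- Python: IndexError on solutions[0] (excluded by Pre_)
  | some s0 =>
    ((PySem.List.pyRange 0 sol_total 1).foldl
      (fun st sol_num => pvScanF st (PySem.List.pyGetD solutions sol_num (0, 0, 0)))
      (s0.2.2 + 1, none)).2

def find_i_j (x : Int) (y : Int) (z : Int) (nchannels : Int) (maxdimsize : Int) : List Int :=
  let z' := pvCeilDiv z nchannels
  if x * y * z' > maxdimsize ^ 2 then []  -- Python: raise ValueError (excluded by Pre_)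
  else
    let max_n := pvCeilLog2 maxdimsize
    let max_m := pvCeilLog2 maxdimsize
    -- (solutions, sol_num) accumulated together, as in A
    let p := (PySem.List.pyRange 1 (max_n + 1) 1).foldl (fun acc n =>
        (PySem.List.pyRange 1 (max_m + 1) 1).foldl (fun acc m =>
          if ((2 : Int) ^ n.toNat).tdiv x * ((2 : Int) ^ m.toNat).tdiv y ≥ z' then
            (acc.1 ++ [(n, m, pvWasteDet x y z' n m)], acc.2 + 1)
          else acc) acc) (([] : List (Int × Int × Int)), (0 : Int))
    match pvFindWasteMin p.2 p.1 with
    | none => []  -- Python: IndexError (excluded by Pre_)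
    | some opt => [2 ^ opt.2.1.toNat, 2 ^ opt.2.2.toNat]

-- ===== PORT B =====
def find_i_j_alt (x : Int) (y : Int) (z : Int) (nchannels : Int) (maxdimsize : Int) : List Int :=
  let z' := pvCeilDiv z nchannels
  if x * y * z' > maxdimsize ^ 2 then []  -- Python: raise ValueError (excluded by Pre_)
  else
    let max_n := pvCeilLog2 maxdimsize
    let best := (PySem.List.pyRange 1 (max_n + 1) 1).foldl (fun best n =>
        let cap_n := ((2 : Int) ^ n.toNat).tdiv x
        (PySem.List.pyRange 1 (max_n + 1) 1).foldl
          (fun (best : Option (Int × Int × Int)) m =>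
            if cap_n * ((2 : Int) ^ m.toNat).tdiv y ≥ z' then
              let waste := 2 ^ (n + m).toNat - x * y * z'
              match best with
              | none => some (waste, n, m)
              | some b => if waste < b.1 then some (waste, n, m) else best
            else best) best) (none : Option (Int × Int × Int))
    match best with
    | none => []  -- Python B: raise ValueError (excluded by Pre_)
    | some b => [2 ^ b.2.1.toNat, 2 ^ b.2.2.toNat]

-- ===== PRECONDITION & SPEC =====
-- Pre_ = exactly the inputs on which A returns: the divisors nchannels, x, y are nonzero,
-- the ValueError guard does not fire, and at least one feasible (n, m) exists (otherwise
-- solutions is empty and solutions[0] raises IndexError; this also forces maxdimsize ≥ 2,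
-- outside of which log/empty ranges make A raise).
def Pre_find_i_j (x : Int) (y : Int) (z : Int) (nchannels : Int) (maxdimsize : Int) : Prop :=
  nchannels ≠ 0 ∧ x ≠ 0 ∧ y ≠ 0 ∧
  x * y * pvCeilDiv z nchannels ≤ maxdimsize ^ 2 ∧
  ∃ n ∈ PySem.List.pyRange 1 (pvCeilLog2 maxdimsize + 1) 1,
    ∃ m ∈ PySem.List.pyRange 1 (pvCeilLog2 maxdimsize + 1) 1,
      ((2 : Int) ^ n.toNat).tdiv x * ((2 : Int) ^ m.toNat).tdiv y ≥ pvCeilDiv z nchannels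
instance (x : Int) (y : Int) (z : Int) (nchannels : Int) (maxdimsize : Int) : Decidable (Pre_find_i_j x y z nchannels maxdimsize) := by unfold Pre_find_i_j; infer_instance

def pvWitness_find_i_j : Int × Int × Int × Int × Int := (1, 1, 1, 3, 4096)

def Spec_find_i_j (x : Int) (y : Int) (z : Int) (nchannels : Int) (maxdimsize : Int) (out : List Int) : Prop := out = find_i_j_alt x y z nchannels maxdimsize
instance (x : Int) (y : Int) (z : Int) (nchannels : Int) (maxdimsize : Int) (out : List Int) : Decidable (Spec_find_i_j x y z nchannels maxdimsize out) := by unfold Spec_find_i_j; infer_instance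

-- ===== CLAIM (what is proved, stated in full; the proofs are below) =====
def Claim_equal_find_i_j : Prop := ∀ (x : Int) (y : Int) (z : Int) (nchannels : Int) (maxdimsize : Int), Dom_find_i_j x y z nchannels maxdimsize → Pre_find_i_j x y z nchannels maxdimsize → Spec_find_i_j x y z nchannels maxdimsize (find_i_j x y z nchannels maxdimsize)

-- ===== LEMMAS AND PROOFS =====

-- the canonical running-min step over built solution triples (n, m, w)
def pvStepC (o : Option (Int × Int × Int)) (s : Int × Int × Int) : Option (Int × Int × Int) :=
  match o with
  | none => some (s.2.2, s.1, s.2.1)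
  | some b => if s.2.2 < b.1 then some (s.2.2, s.1, s.2.1) else o

-- A's scan with state (waste_min, opt), started after the first (always-taken) update,
-- computes the canonical running min
lemma pvScan_inv (L : List (Int × Int × Int)) : ∀ (b : Int × Int × Int),
    (L.foldl pvScanF (b.1, some b)).2 = L.foldl pvStepC (some b) := by
  induction L with
  | nil => intro b; rfl
  | cons s L ih =>
    intro b
    by_cases h : s.2.2 < b.1
    · have h1 : pvScanF (b.1, some b) s = (s.2.2, some (s.2.2, s.1, s.2.1)) := by
        simp [pvScanF, h]
      have h2 : pvStepC (some b) s = some (s.2.2, s.1, s.2.1) := by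
        simp [pvStepC, h]
      rw [List.foldl_cons, List.foldl_cons, h1, h2]
      exact ih (s.2.2, s.1, s.2.1)
    · have h1 : pvScanF (b.1, some b) s = (b.1, some b) := by
        simp [pvScanF, h]
      have h2 : pvStepC (some b) s = some b := by
        simp [pvStepC, h]
      rw [List.foldl_cons, List.foldl_cons, h1, h2]
      exact ih b

lemma pvScan_eq (s0 : Int × Int × Int) (rest : List (Int × Int × Int)) :
    ((s0 :: rest).foldl pvScanF (s0.2.2 + 1, none)).2
      = (s0 :: rest).foldl pvStepC none := by
  have h1 : pvScanF (s0.2.2 + 1, none) s0 = (s0.2.2, some (s0.2.2, s0.1, s0.2.1)) := by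
    simp [pvScanF]
  have h2 : pvStepC none s0 = some (s0.2.2, s0.1, s0.2.1) := rfl
  rw [List.foldl_cons, List.foldl_cons, h1, h2]
  exact pvScan_inv rest (s0.2.2, s0.1, s0.2.1)

-- state fold over a guarded loop = fold over the filtered-mapped item list
lemma pvFuse {σ : Type} (g : σ → (Int × Int × Int) → σ) (cond : Int → Prop)
    [DecidablePred cond] (item : Int → Int × Int × Int) (ms : List Int) : ∀ (st : σ),
    ms.foldl (fun st m => if cond m then g st (item m) else st) st
      = ((ms.filter (fun m => decide (cond m))).map item).foldl g st := by
  induction ms with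
  | nil => intro st; rfl
  | cons m ms ih =>
    intro st
    by_cases h : cond m <;> simp [h, ih]

-- the (solutions, sol_num) pair fold builds exactly (acc ++ filtered items, counter + count)
lemma pvBuild (cond : Int → Prop) [DecidablePred cond] (item : Int → Int × Int × Int)
    (ms : List Int) : ∀ (acc : List (Int × Int × Int)) (c : Int),
    ms.foldl (fun p m => if cond m then (p.1 ++ [item m], p.2 + 1) else p) (acc, c)
      = (acc ++ ((ms.filter (fun m => decide (cond m))).map item : List (Int × Int × Int)),
         c + (((ms.filter (fun m => decide (cond m))).map item).length : Int)) := by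
  induction ms with
  | nil => intro acc c; simp
  | cons m ms ih =>
    intro acc c
    by_cases h : cond m
    · rw [List.foldl_cons, if_pos h, ih]
      rw [List.filter_cons, if_pos (by simpa using h)]
      rw [Prod.mk.injEq]
      refine ⟨by simp, ?_⟩
      simp only [List.map_cons, List.length_cons]
      push_cast
      ring
    · rw [List.foldl_cons, if_neg h, ih]
      rw [List.filter_cons, if_neg (by simpa using h)]

theorem find_i_j_spec : Claim_equal_find_i_j := by
  intro x y z nchannels maxdimsize _hDom hPre
  obtain ⟨hnch, hx, hy, hguard, hfeas⟩ := hPre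
  unfold Spec_find_i_j find_i_j find_i_j_alt
  set z' := pvCeilDiv z nchannels with hz'
  rw [if_neg (by omega), if_neg (by omega)]
  dsimp only
  set K := pvCeilLog2 maxdimsize with hK
  set ns := PySem.List.pyRange 1 (K + 1) 1 with hns
  set item : Int → Int → Int × Int × Int :=
    fun n m => (n, m, pvWasteDet x y z' n m) with hitem
  set F : Int → List (Int × Int × Int) := fun n =>
    ((ns.filter (fun m =>
        decide (((2 : Int) ^ n.toNat).tdiv x * ((2 : Int) ^ m.toNat).tdiv y ≥ z'))).map
      (item n)) with hF
  set S : List (Int × Int × Int) := ns.flatMap F with hS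
  -- A's builder produces (S, |S|)
  have hbuild : ns.foldl (fun acc n =>
      ns.foldl (fun (acc : List (Int × Int × Int) × Int) (m : Int) =>
        if ((2 : Int) ^ n.toNat).tdiv x * ((2 : Int) ^ m.toNat).tdiv y ≥ z' then
          (acc.1 ++ [(n, m, pvWasteDet x y z' n m)], acc.2 + 1)
        else acc) acc) (([] : List (Int × Int × Int)), (0 : Int))
      = (S, (S.length : Int)) := by
    have gen : ∀ (l : List Int) (acc : List (Int × Int × Int)) (c : Int),
        l.foldl (fun (acc : List (Int × Int × Int) × Int) (n : Int) =>
          ns.foldl (fun (acc : List (Int × Int × Int) × Int) (m : Int) =>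
            if ((2 : Int) ^ n.toNat).tdiv x * ((2 : Int) ^ m.toNat).tdiv y ≥ z' then
              (acc.1 ++ [(n, m, pvWasteDet x y z' n m)], acc.2 + 1)
            else acc) acc) (acc, c)
        = (acc ++ l.flatMap F, c + ((l.flatMap F).length : Int)) := by
      intro l
      induction l with
      | nil => intro acc c; simp
      | cons n l ih =>
        intro acc c
        rw [List.foldl_cons]
        rw [pvBuild (fun m => ((2 : Int) ^ n.toNat).tdiv x * ((2 : Int) ^ m.toNat).tdiv y ≥ z')
          (item n) ns acc c]
        rw [ih]
        rw [Prod.mk.injEq]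
        refine ⟨by simp [hF, List.flatMap_cons, List.append_assoc], ?_⟩
        simp only [hF, List.flatMap_cons, List.length_append]
        push_cast
        ring
    have := gen ns [] 0
    simpa [hS] using this
  rw [hbuild]
  -- B's nested fold is the canonical running min over S
  have hB : ns.foldl (fun best n =>
      let cap_n := ((2 : Int) ^ n.toNat).tdiv x
      ns.foldl (fun (best : Option (Int × Int × Int)) m =>
        if cap_n * ((2 : Int) ^ m.toNat).tdiv y ≥ z' then
          let waste := 2 ^ (n + m).toNat - x * y * z'
          match best with
          | none => some (waste, n, m)
          | some b => if waste < b.1 then some (waste, n, m) else best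
        else best) best) (none : Option (Int × Int × Int))
      = S.foldl pvStepC none := by
    have gen : ∀ (l : List Int) (o : Option (Int × Int × Int)),
        l.foldl (fun best n =>
          let cap_n := ((2 : Int) ^ n.toNat).tdiv x
          ns.foldl (fun (best : Option (Int × Int × Int)) m =>
            if cap_n * ((2 : Int) ^ m.toNat).tdiv y ≥ z' then
              let waste := 2 ^ (n + m).toNat - x * y * z'
              match best with
              | none => some (waste, n, m)
              | some b => if waste < b.1 then some (waste, n, m) else best
            else best) best) o
        = (l.flatMap F).foldl pvStepC o := by
      intro l
      induction l with
      | nil => intro o; rfl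
      | cons n l ih =>
        intro o
        have hstep : ∀ (o' : Option (Int × Int × Int)),
            ns.foldl (fun (best : Option (Int × Int × Int)) m =>
              if ((2 : Int) ^ n.toNat).tdiv x * ((2 : Int) ^ m.toNat).tdiv y ≥ z' then
                let waste := 2 ^ (n + m).toNat - x * y * z'
                match best with
                | none => some (waste, n, m)
                | some b => if waste < b.1 then some (waste, n, m) else best
              else best) o'
            = (F n).foldl pvStepC o' := by
          intro o'
          rw [hF]
          rw [← pvFuse pvStepC
            (fun m => ((2 : Int) ^ n.toNat).tdiv x * ((2 : Int) ^ m.toNat).tdiv y ≥ z')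
            (item n) ns o']
          apply PySem.List.foldl_congr_mem
          intro acc m _
          by_cases h : ((2 : Int) ^ n.toNat).tdiv x * ((2 : Int) ^ m.toNat).tdiv y ≥ z'
          · rw [if_pos h, if_pos h]
            cases acc with
            | none => simp [hitem, pvStepC, pvWasteDet]
            | some b => simp [hitem, pvStepC, pvWasteDet]
          · rw [if_neg h, if_neg h]
        rw [List.foldl_cons, List.flatMap_cons, List.foldl_append, ← ih, hstep]
    exact gen ns none
  rw [hB]
  -- S is nonempty, by the feasibility witness in Pre_
  obtain ⟨n, hn, m, hm, hnm⟩ := hfeas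
  have hSne : S ≠ [] := by
    have hnmem : n ∈ ns := hn
    have hmmem : m ∈ ns := hm
    intro hempty
    have hmemS : item n m ∈ S := by
      rw [hS]
      refine List.mem_flatMap.mpr ⟨n, hnmem, ?_⟩
      rw [hF]
      exact List.mem_map_of_mem (List.mem_filter.mpr ⟨hmmem, by simpa using hnm⟩)
    rw [hempty] at hmemS
    exact absurd hmemS (List.not_mem_nil)
  obtain ⟨s0, rest, hcons⟩ := List.exists_cons_of_ne_nil hSne
  -- A's pvFindWasteMin over (|S|, S) is the same canonical running min
  have hA : pvFindWasteMin (S.length : Int) S = S.foldl pvStepC none := by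
    unfold pvFindWasteMin
    rw [hcons, PySem.List.pyGet?_zero_cons]
    dsimp only
    rw [PySem.List.foldl_pyRange_pyGetD' (xs := s0 :: rest) (a := 0)
      (f := pvScanF) (d := ((0 : Int), (0 : Int), (0 : Int)))
      (init := (s0.2.2 + 1, (none : Option (Int × Int × Int)))) (by omega)]
    simp only [Int.toNat_zero, List.drop_zero]
    exact pvScan_eq s0 rest
  rw [hA]
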